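-- pv_equiv track=rewrite | github.com/Shaheer2492/BCI-Classifer | src/generate_ground_truth_labels.py | _get_run_info
-- ===== SOURCE A (Python) =====
-- def _get_run_info(events, runs):
--     """Get information about which run each trial belongs to."""
--     # Simplified: just return run indices
--     # In a more sophisticated version, we'd track exact run boundaries
--     n_trials = len(events)
--     n_runs = len(runs)
--     if n_runs > 0:
--         trials_per_run = n_trials // n_runs
--     else:
--         trials_per_run = n_trials # Fallback
--
--     run_info = []
--     for i in range(n_trials):
--         if n_runs > 0 and trials_per_run > 0:
--             run_idx = min(i // trials_per_run, n_runs - 1)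
--             run_info.append(runs[run_idx])
--         else:
--             run_info.append(0)
--
--     return run_info
-- ===== SOURCE B (Python) =====
-- def _get_run_info(events, runs):
--     """Get information about which run each trial belongs to."""
--     n_trials = len(events)
--     n_runs = len(runs)
--     trials_per_run = n_trials // n_runs if n_runs else 0
--     if n_runs and trials_per_run:
--         run_info = []
--         for r in runs[:-1]:
--             run_info += [r] * trials_per_run
--         # the last run absorbs all remaining trials (the integer-division remainder)
--         run_info += [runs[-1]] * (n_trials - (n_runs - 1) * trials_per_run)
--         return run_info
--     return [0] * n_trials
-- ===== Notes on version B (the rewrite author's own statement) =====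
-- stated objective: alternative
-- what changed: B builds the result per run in blocks (one replicate per run, last run absorbs the remainder) instead of looping over every trial and computing min(i//trials_per_run, n_runs-1) for each.
import Mathlib
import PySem

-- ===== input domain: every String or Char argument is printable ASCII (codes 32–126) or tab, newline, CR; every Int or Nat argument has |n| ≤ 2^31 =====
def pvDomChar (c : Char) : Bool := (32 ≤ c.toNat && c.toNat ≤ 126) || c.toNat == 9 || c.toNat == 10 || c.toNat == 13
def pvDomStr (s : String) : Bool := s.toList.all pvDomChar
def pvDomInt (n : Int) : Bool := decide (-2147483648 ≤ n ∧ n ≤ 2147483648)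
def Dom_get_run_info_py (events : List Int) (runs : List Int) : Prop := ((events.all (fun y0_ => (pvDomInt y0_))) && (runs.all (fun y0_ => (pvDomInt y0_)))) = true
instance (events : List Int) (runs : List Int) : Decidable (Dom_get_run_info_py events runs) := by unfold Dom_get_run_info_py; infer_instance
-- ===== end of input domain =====

-- B builds the label list per run in blocks (replicate per run; last run absorbs the remainder) instead of computing min(i//tpr, n_runs-1) per trial — alternative decomposition, same cost.


-- ===== PORT A =====
-- literal transliteration of A; runs[run_idx] is ported with pyGetD (the index is always in range in the branch where it is used)
def get_run_info_py (events : List Int) (runs : List Int) : List Int :=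
  let n_trials : Int := events.length
  let n_runs : Int := runs.length
  let trials_per_run : Int := if n_runs > 0 then PySem.Int.floordiv n_trials n_runs else n_trials
  (PySem.List.pyRange 0 n_trials 1).foldl (fun run_info i =>
    if n_runs > 0 ∧ trials_per_run > 0 then
      run_info ++ [PySem.List.pyGetD runs (min (PySem.Int.floordiv i trials_per_run) (n_runs - 1)) 0]
    else
      run_info ++ [(0 : Int)]) []

-- ===== PORT B =====
-- literal transliteration of Source B; runs[:-1] → dropLast, runs[-1] → getLast?.getD (in range in that branch), [x]*k → replicate
def get_run_info_py_alt (events : List Int) (runs : List Int) : List Int :=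
  let n_trials : Int := events.length
  let n_runs : Int := runs.length
  let trials_per_run : Int := if n_runs ≠ 0 then PySem.Int.floordiv n_trials n_runs else 0
  if n_runs ≠ 0 ∧ trials_per_run ≠ 0 then
    (runs.dropLast.foldl (fun run_info r => run_info ++ List.replicate trials_per_run.toNat r) []) ++
      List.replicate (n_trials - (n_runs - 1) * trials_per_run).toNat (runs.getLast?.getD 0)
  else
    List.replicate n_trials.toNat 0

-- ===== PRECONDITION & SPEC =====
def Spec_get_run_info_py (events : List Int) (runs : List Int) (out : List Int) : Prop := out = get_run_info_py_alt events runs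
instance (events : List Int) (runs : List Int) (out : List Int) : Decidable (Spec_get_run_info_py events runs out) := by unfold Spec_get_run_info_py; infer_instance

-- ===== CLAIM (what is proved, stated in full; the proofs are below) =====
def Claim_equal_get_run_info_py : Prop := ∀ (events : List Int) (runs : List Int), Dom_get_run_info_py events runs → Spec_get_run_info_py events runs (get_run_info_py events runs)

-- ===== LEMMAS AND PROOFS =====

theorem pv_length_flatMap_replicate (t : Nat) (l : List Int) :
    (l.flatMap (fun r => List.replicate t r)).length = l.length * t := by
  induction l with
  | nil => simp
  | cons a l ih => simp [List.flatMap_cons, ih, Nat.succ_mul]; omega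

theorem pv_getElem?_flatMap_replicate (t : Nat) (ht : 0 < t) (l : List Int) (i : Nat)
    (hi : i < l.length * t) :
    (l.flatMap (fun r => List.replicate t r))[i]? = l[i / t]? := by
  induction l generalizing i with
  | nil => simp at hi
  | cons a l ih =>
    simp only [List.flatMap_cons]
    by_cases h : i < t
    · rw [List.getElem?_append_left (by simpa using h)]
      rw [Nat.div_eq_of_lt h]
      simp [h]
    · push_neg at h
      rw [List.getElem?_append_right (by simpa using h)]
      simp only [List.length_replicate]
      have hlt : i - t < l.length * t := by
        have := hi; simp [Nat.succ_mul] at this; omega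
      rw [ih (i - t) hlt]
      have : i / t = (i - t) / t + 1 := by
        have h1 : i = (i - t) + t := by omega
        conv_lhs => rw [h1]
        rw [Nat.add_div_right _ ht]
      rw [this]
      simp

-- foldl-append form of B's inner loop is a flatMap
theorem pv_foldl_replicate_eq_flatMap (t : Nat) (l : List Int) (acc : List Int) :
    l.foldl (fun out r => out ++ List.replicate t r) acc = acc ++ l.flatMap (fun r => List.replicate t r) := by
  induction l generalizing acc with
  | nil => simp
  | cons a l ih => simp [List.foldl_cons, ih, List.flatMap_cons]

-- the core combinatorial identity, in Nat form
theorem pv_blocks_eq (runs : List Int) (hm : runs ≠ []) (t : Nat) (ht : 0 < t) (n : Nat)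
    (hn : (runs.length - 1) * t ≤ n) :
    (List.range n).map (fun k => runs.getD (min (k / t) (runs.length - 1)) 0)
      = runs.dropLast.flatMap (fun r => List.replicate t r)
        ++ List.replicate (n - (runs.length - 1) * t) (runs.getLast?.getD 0) := by
  have hm1 : 1 ≤ runs.length := List.length_pos_iff.mpr hm
  apply List.ext_getElem?
  intro i
  by_cases hin : i < n
  · rw [List.getElem?_map, List.getElem?_range hin]
    simp only [Option.map_some]
    by_cases hb : i < (runs.length - 1) * t
    · have hdiv : i / t < runs.length - 1 := (Nat.div_lt_iff_lt_mul ht).mpr hb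
      rw [List.getElem?_append_left (by
        rw [pv_length_flatMap_replicate, List.length_dropLast]; exact hb)]
      rw [pv_getElem?_flatMap_replicate t ht _ i (by
        rw [List.length_dropLast]; exact hb)]
      have hmin : min (i / t) (runs.length - 1) = i / t := by omega
      rw [hmin]
      have hidx : i / t < runs.length := by omega
      have hidx' : i / t < runs.dropLast.length := by rw [List.length_dropLast]; omega
      rw [List.getElem?_eq_getElem hidx', List.getElem_dropLast]
      simp [List.getD, List.getElem?_eq_getElem hidx]
    · push_neg at hb
      rw [List.getElem?_append_right (by
        rw [pv_length_flatMap_replicate, List.length_dropLast]; exact hb)]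
      rw [pv_length_flatMap_replicate, List.length_dropLast]
      have hdiv : runs.length - 1 ≤ i / t := (Nat.le_div_iff_mul_le ht).mpr hb
      have hmin : min (i / t) (runs.length - 1) = runs.length - 1 := by omega
      rw [hmin]
      rw [List.getElem?_replicate]
      have : i - (runs.length - 1) * t < n - (runs.length - 1) * t := by omega
      simp only [this, if_true]
      rw [List.getLast?_eq_getElem? ]
      have hlt : runs.length - 1 < runs.length := by omega
      simp [List.getD, List.getElem?_eq_getElem hlt]
  · push_neg at hin
    rw [List.getElem?_eq_none (by simpa using hin)]
    rw [List.getElem?_eq_none (by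
      rw [List.length_append, pv_length_flatMap_replicate, List.length_dropLast,
        List.length_replicate]; omega)]

-- flatMap of a singleton-producing function is a map
theorem pv_flatMap_single (l : List Int) (g : Int → Int) :
    l.flatMap (fun x => [g x]) = l.map g := by
  induction l with
  | nil => rfl
  | cons a l ih => simp [List.flatMap_cons, ih]

-- A's trial loop when the guard is false: every trial appends 0
theorem pv_foldl_if_zeros (c : Prop) [Decidable c] (hc : ¬ c) (f : Int → Int)
    (l acc : List Int) :
    l.foldl (fun run_info i => if c then run_info ++ [f i] else run_info ++ [(0 : Int)]) acc
      = acc ++ List.replicate l.length 0 := by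
  induction l generalizing acc with
  | nil => simp
  | cons a l ih =>
    rw [List.foldl_cons, ih, if_neg hc]
    simp [List.replicate_succ]

-- A written as a map over List.range (the branch where both lengths are positive)
theorem pv_A_main (events runs : List Int) (hm : runs.length ≠ 0)
    (ht : events.length / runs.length ≠ 0) :
    get_run_info_py events runs
      = (List.range events.length).map
          (fun k => runs.getD (min (k / (events.length / runs.length)) (runs.length - 1)) 0) := by
  have hm0 : (0 : Int) < (runs.length : Int) := by exact_mod_cast Nat.pos_of_ne_zero hm
  have htpr : PySem.Int.floordiv (events.length : Int) (runs.length : Int)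
      = ((events.length / runs.length : Nat) : Int) :=
    PySem.Int.floordiv_natCast _ _
  have ht0 : (0 : Int) < ((events.length / runs.length : Nat) : Int) := by
    exact_mod_cast Nat.pos_of_ne_zero ht
  simp only [get_run_info_py, htpr, if_pos hm0, if_pos (And.intro hm0 ht0)]
  rw [PySem.List.foldl_append_eq_flatMap
    (g := fun i => [PySem.List.pyGetD runs
      (min (PySem.Int.floordiv i ((events.length / runs.length : Nat) : Int)) ((runs.length : Int) - 1)) 0])]
  rw [List.nil_append, pv_flatMap_single, PySem.List.pyRange_zero_natCast]
  rw [List.map_map]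
  apply List.map_congr_left
  intro k _
  have hdiv : PySem.Int.floordiv ((k : Nat) : Int) ((events.length / runs.length : Nat) : Int)
      = ((k / (events.length / runs.length) : Nat) : Int) := PySem.Int.floordiv_natCast _ _
  have hsub : ((runs.length : Nat) : Int) - 1 = ((runs.length - 1 : Nat) : Int) := by
    have := Nat.pos_of_ne_zero hm; push_cast [this]; ring
  simp only [Function.comp, hdiv, hsub]
  rw [← Nat.cast_min, PySem.List.pyGetD_natCast]

theorem get_run_info_py_eq (events runs : List Int) :
    get_run_info_py events runs = get_run_info_py_alt events runs := by
  by_cases hm : runs.length = 0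
  · -- no runs: both sides are n_trials zeros
    simp only [get_run_info_py, get_run_info_py_alt, hm, Nat.cast_zero]
    rw [pv_foldl_if_zeros _ (by simp) _ _ _, if_neg (by simp), List.nil_append,
      PySem.List.length_pyRange_one]
    simp
  · by_cases ht : events.length / runs.length = 0
    · -- more runs than trials: trials_per_run == 0, both sides are zeros
      have hm0 : (0 : Int) < (runs.length : Int) := by exact_mod_cast Nat.pos_of_ne_zero hm
      have htpr : PySem.Int.floordiv (events.length : Int) (runs.length : Int)
          = ((events.length / runs.length : Nat) : Int) := PySem.Int.floordiv_natCast _ _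
      simp only [get_run_info_py, get_run_info_py_alt, if_pos hm0, htpr, ht, Nat.cast_zero]
      rw [pv_foldl_if_zeros _ (by simp) _ _ _, if_neg (by simp), List.nil_append,
        PySem.List.length_pyRange_one]
      simp
    · -- main branch
      have hmpos : 0 < runs.length := Nat.pos_of_ne_zero hm
      have htpos : 0 < events.length / runs.length := Nat.pos_of_ne_zero ht
      have hmne : runs ≠ [] := by
        intro h; rw [h] at hm; exact hm rfl
      set t : Nat := events.length / runs.length with htdef
      have hn : (runs.length - 1) * t ≤ events.length := by
        calc (runs.length - 1) * t ≤ runs.length * t := Nat.mul_le_mul_right t (by omega)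
          _ = t * runs.length := Nat.mul_comm _ _
          _ ≤ events.length := Nat.div_mul_le_self _ _
      rw [pv_A_main events runs hm ht, pv_blocks_eq runs hmne t htpos events.length hn]
      -- now reduce B to the same block form
      have hmI : ((runs.length : Int)) ≠ 0 := by exact_mod_cast hm
      have htpr : PySem.Int.floordiv (events.length : Int) (runs.length : Int)
          = ((t : Nat) : Int) := PySem.Int.floordiv_natCast _ _
      have htI : ((t : Nat) : Int) ≠ 0 := by exact_mod_cast ht
      simp only [get_run_info_py_alt, htpr, if_pos hmI, if_pos (And.intro hmI htI)]
      rw [pv_foldl_replicate_eq_flatMap (((t : Nat) : Int)).toNat runs.dropLast [], List.nil_append]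
      simp only [Int.toNat_natCast]
      have hp : (((runs.length - 1) * t : Nat) : Int) = ((runs.length : Int) - 1) * ((t : Nat) : Int) := by
        push_cast [Nat.cast_sub (show 1 ≤ runs.length from hmpos)]
        ring
      have h1 : (((events.length : Int)) - ((runs.length : Int) - 1) * ((t : Nat) : Int)).toNat
          = events.length - (runs.length - 1) * t := by omega
      rw [h1]

-- ===== VERDICT (by name: the statement is the Claim_ definition above) =====
theorem get_run_info_py_spec : Claim_equal_get_run_info_py := by
  intro events runs _
  exact get_run_info_py_eq events runs
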